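-- pv_equiv track=rewrite | github.com/matsu582/o2md | x2md_tables.py | _collapse_repeated_sequence
-- ===== SOURCE A (Python) =====
-- from typing import List, Dict, Tuple, Optional, Any, Set
--
-- def _collapse_repeated_sequence(parts: List[str]) -> List[str]:
--     """partsが繰り返しシーケンス（[A,B,A,B,A,B]のような）かどうかを検出し、最小の繰り返しパターンを1回返す。
--
--     完全な繰り返しが見つからない場合は、partsをそのまま返す。
--     """
--     try:
--         if not parts:
--             return parts
--         n = len(parts)
--         # n//2までのすべての可能なパターン長を試す
--         for plen in range(1, n // 2 + 1):
--             if n % plen != 0: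
--                 continue
--             pattern = parts[0:plen]
--             if pattern * (n // plen) == parts:
--                 return pattern
--         return parts
--     except Exception:
--         return parts
-- ===== SOURCE B (Python) =====
-- from typing import List
--
-- def _collapse_repeated_sequence(parts: List[str]) -> List[str]:
--     """Smallest repeating pattern via the least nonzero cyclic shift that fixes the list.
--
--     The shifts fixing the list form a subgroup of Z_n, so the least one divides n
--     and its prefix is exactly the minimal repeating pattern.
--     """
--     n = len(parts)
--     if n == 0:
--         return parts
--     p = n
--     for i in range(1, n):
--         if all(parts[j] == parts[(j + i) % n] for j in range(n)):
--             p = i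
--             break
--     return parts[:p] if p < n else parts
-- ===== Notes on version B (the rewrite author's own statement) =====
-- stated objective: alternative
-- what changed: B drops A's divisor enumeration and tile building entirely: it finds the least nonzero cyclic shift i that maps the list onto itself (compared pointwise through modular indexing parts[j] == parts[(j+i) % n]); since the fixing shifts form a subgroup of Z_n, that least shift is exactly the minimal repeating-pattern length.
import Mathlib
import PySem

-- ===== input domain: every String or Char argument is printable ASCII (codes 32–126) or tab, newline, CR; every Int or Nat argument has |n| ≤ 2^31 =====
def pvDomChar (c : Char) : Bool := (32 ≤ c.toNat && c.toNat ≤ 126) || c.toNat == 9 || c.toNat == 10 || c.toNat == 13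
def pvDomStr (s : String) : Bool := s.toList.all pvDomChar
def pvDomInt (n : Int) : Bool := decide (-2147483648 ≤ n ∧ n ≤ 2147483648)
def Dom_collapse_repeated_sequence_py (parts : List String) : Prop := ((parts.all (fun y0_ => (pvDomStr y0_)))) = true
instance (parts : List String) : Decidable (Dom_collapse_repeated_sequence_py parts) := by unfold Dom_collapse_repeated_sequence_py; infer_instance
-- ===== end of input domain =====

-- B replaces A's divisor scan with tile building by a search for the least nonzero
-- cyclic shift that maps the list onto itself (modular pointwise comparison);
-- alternative algorithm, no speed claim.

-- ===== PORT A =====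
-- the 'for plen in range(...)' loop with 'continue' and early 'return pattern'
def pvALoop (parts : List String) (n : Int) : List Int → Option (List String)
  | [] => none
  | plen :: rest =>
    if PySem.Int.mod n plen ≠ 0 then pvALoop parts n rest
    else
      let pattern := PySem.List.slice parts (some 0) (some plen)
      if (List.replicate (PySem.Int.floordiv n plen).toNat pattern).flatten = parts then
        some pattern
      else pvALoop parts n rest

def collapse_repeated_sequence_py (parts : List String) : List String :=
  if parts = [] then parts
  else
    let n : Int := parts.length
    match pvALoop parts n (PySem.List.pyRange 1 (PySem.Int.floordiv n 2 + 1) 1) with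
    | some pattern => pattern
    | none => parts

-- ===== PORT B =====
-- the generator 'all(parts[j] == parts[(j + i) % n] for j in range(n))'
def pvShiftFixes (parts : List String) (n i : Int) : Bool :=
  (PySem.List.pyRange 0 n 1).all (fun j =>
    PySem.List.pyGet? parts j == PySem.List.pyGet? parts (PySem.Int.mod (j + i) n))

def collapse_repeated_sequence_py_alt (parts : List String) : List String :=
  let n : Int := parts.length
  if n = 0 then parts
  else
    -- 'p = n; for i in range(1, n): if <fix>: p = i; break'
    let p := ((PySem.List.pyRange 1 n 1).find? (pvShiftFixes parts n)).getD n
    if p < n then PySem.List.slice parts none (some p) else parts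

-- ===== PRECONDITION & SPEC =====
def Spec_collapse_repeated_sequence_py (parts : List String) (out : List String) : Prop := out = collapse_repeated_sequence_py_alt parts
instance (parts : List String) (out : List String) : Decidable (Spec_collapse_repeated_sequence_py parts out) := by unfold Spec_collapse_repeated_sequence_py; infer_instance

-- ===== CLAIM (what is proved, stated in full; the proofs are below) =====
def Claim_equal_collapse_repeated_sequence_py : Prop := ∀ (parts : List String), Dom_collapse_repeated_sequence_py parts → Spec_collapse_repeated_sequence_py parts (collapse_repeated_sequence_py parts)

-- ===== LEMMAS AND PROOFS =====

-- i is a cyclic period of l: shifting every position by i (mod length) fixes l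
def pvCyc (l : List String) (i : Nat) : Prop :=
  ∀ j, j < l.length → l.getD j "" = l.getD ((j + i) % l.length) ""

-- d tiles l pointwise: every entry equals the entry at its index mod d
def pvTiles (l : List String) (d : Nat) : Prop :=
  ∀ j, j < l.length → l.getD j "" = l.getD (j % d) ""

theorem pvCyc_congr_mod (l : List String) (i i' : Nat)
    (h : i % l.length = i' % l.length) : pvCyc l i ↔ pvCyc l i' := by
  have key : ∀ j, (j + i) % l.length = (j + i') % l.length := by
    intro j
    rw [Nat.add_mod j i, h, ← Nat.add_mod]
  unfold pvCyc
  constructor <;> intro hc j hj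
  · rw [← key]; exact hc j hj
  · rw [key]; exact hc j hj

theorem pvCyc_add (l : List String) (a b : Nat)
    (ha : pvCyc l a) (hb : pvCyc l b) : pvCyc l (a + b) := by
  intro j hj
  have hn : 0 < l.length := by omega
  rw [ha j hj, hb ((j + a) % l.length) (Nat.mod_lt _ (by omega))]
  congr 1
  rw [Nat.mod_add_mod, Nat.add_assoc]

theorem pvCyc_mul (l : List String) (a : Nat) (ha : pvCyc l a) (k : Nat) :
    pvCyc l (k * a) := by
  induction k with
  | zero =>
    intro j hj
    rw [Nat.zero_mul, Nat.add_zero, Nat.mod_eq_of_lt hj]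
  | succ k ih =>
    have := pvCyc_add l (k * a) a ih ha
    rwa [Nat.succ_mul]

theorem pvCyc_len (l : List String) : pvCyc l l.length := by
  intro j hj
  rw [Nat.add_mod_right, Nat.mod_eq_of_lt hj]

theorem pvCyc_gcd (l : List String) (hn : 0 < l.length) (a b : Nat)
    (ha : pvCyc l a) (hb : pvCyc l b) : pvCyc l (Nat.gcd a b) := by
  set n := l.length with hndef
  set u := Nat.gcdA a b with hu
  set v := Nat.gcdB a b with hv
  set u' : Nat := (u % (n : Int)).toNat with hu'
  set v' : Nat := (v % (n : Int)).toNat with hv'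
  have hcyc : pvCyc l (a * u' + b * v') := by
    have h1 := pvCyc_mul l a ha u'
    have h2 := pvCyc_mul l b hb v'
    have := pvCyc_add l (u' * a) (v' * b) h1 h2
    rwa [Nat.mul_comm u' a, Nat.mul_comm v' b] at this
  have hmod : (a * u' + b * v') % n = Nat.gcd a b % n := by
    have hnz : (n : Int) ≠ 0 := by exact_mod_cast hn.ne'
    have hu'' : (u' : Int) % n = u % n := by
      rw [hu', Int.toNat_of_nonneg (Int.emod_nonneg u hnz), Int.emod_emod_of_dvd u dvd_rfl]
    have hv'' : (v' : Int) % n = v % n := by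
      rw [hv', Int.toNat_of_nonneg (Int.emod_nonneg v hnz), Int.emod_emod_of_dvd v dvd_rfl]
    have hmequ : ((u' : Int)) ≡ u [ZMOD (n : Int)] := hu''
    have hmeqv : ((v' : Int)) ≡ v [ZMOD (n : Int)] := hv''
    have hbez : (Nat.gcd a b : Int) = a * u + b * v := Nat.gcd_eq_gcd_ab a b
    have : ((a * u' + b * v' : Nat) : Int) ≡ (Nat.gcd a b : Int) [ZMOD (n : Int)] := by
      rw [hbez]
      push_cast
      exact (hmequ.mul_left (a : Int)).add (hmeqv.mul_left (b : Int))
    have h2 : ((a * u' + b * v' : Nat) : Int) % (n : Int) = ((Nat.gcd a b : Nat) : Int) % (n : Int) := this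
    rw [← Int.natCast_mod, ← Int.natCast_mod] at h2
    exact_mod_cast h2
  exact (pvCyc_congr_mod l _ _ hmod).mp hcyc

theorem pvCyc_tiles (l : List String) (d : Nat) (_hd : 0 < d)
    (hc : pvCyc l d) : pvTiles l d := by
  intro j hj
  have hmul := pvCyc_mul l d hc (j / d)
  have hlt : j % d < l.length := lt_of_le_of_lt (Nat.mod_le j d) hj
  have := hmul (j % d) hlt
  rw [Nat.mod_add_div', Nat.mod_eq_of_lt hj] at this
  exact this.symm

theorem pvTiles_cyc (l : List String) (d : Nat) (hdvd : d ∣ l.length)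
    (ht : pvTiles l d) : pvCyc l d := by
  intro j hj
  have hn : 0 < l.length := by omega
  have hd : 0 < d := by
    rcases Nat.eq_zero_or_pos d with h | h
    · subst h; rw [Nat.zero_dvd] at hdvd; omega
    · exact h
  have hdle : d ≤ l.length := Nat.le_of_dvd hn hdvd
  by_cases hlt : j + d < l.length
  · rw [Nat.mod_eq_of_lt hlt, ht j hj, ht (j + d) hlt, Nat.add_mod_right]
  · obtain ⟨m, hm⟩ := hdvd
    have hmod : (j + d) % l.length = j + d - l.length := by
      rw [Nat.mod_eq_sub_mod (by omega), Nat.mod_eq_of_lt (by omega)]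
    rw [hmod, ht j hj, ht (j + d - l.length) (by omega)]
    congr 1
    have hsum : j + d - l.length + d * m = j + d := by omega
    calc j % d = (j + d) % d := (Nat.add_mod_right j d).symm
      _ = (j + d - l.length + d * m) % d := by rw [hsum]
      _ = (j + d - l.length) % d := by rw [Nat.add_mul_mod_self_left]

-- minimal positive cyclic period divides every positive cyclic period
theorem pv_min_dvd (l : List String) (hn : 0 < l.length) (s i : Nat)
    (hs : 0 < s) (hcs : pvCyc l s)
    (hmin : ∀ t, 0 < t → pvCyc l t → s ≤ t)
    (_hi : 0 < i) (hci : pvCyc l i) : s ∣ i := by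
  have hg := pvCyc_gcd l hn s i hcs hci
  have hgpos : 0 < Nat.gcd s i := Nat.gcd_pos_of_pos_left i hs
  have h1 : s ≤ Nat.gcd s i := hmin _ hgpos hg
  have h2 : Nat.gcd s i ≤ s := Nat.le_of_dvd hs (Nat.gcd_dvd_left s i)
  have : Nat.gcd s i = s := le_antisymm h2 h1
  rw [← this]
  exact Nat.gcd_dvd_right s i

-- getD of the flattening of a replicated block
theorem pv_flatten_replicate_getD (xs : List String) (_hx : 0 < xs.length)
    (k j : Nat) (hj : j < k * xs.length) :
    (List.replicate k xs).flatten.getD j "" = xs.getD (j % xs.length) "" := by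
  induction k generalizing j with
  | zero => omega
  | succ k ih =>
    rw [Nat.succ_mul] at hj
    rw [List.replicate_succ, List.flatten_cons]
    by_cases h : j < xs.length
    · rw [List.getD_append _ _ _ _ h, Nat.mod_eq_of_lt h]
    · have hlen : j - xs.length < k * xs.length := by omega
      rw [List.getD_append_right _ _ _ _ (by omega), ih _ hlen]
      congr 1
      have : j = j - xs.length + 1 * xs.length := by omega
      conv_rhs => rw [this, Nat.add_mul_mod_self_right]

theorem pv_flatten_replicate_length (xs : List String) (k : Nat) :
    (List.replicate k xs).flatten.length = k * xs.length := by
  induction k with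
  | zero => simp
  | succ k ih => rw [List.replicate_succ, List.flatten_cons, List.length_append, ih]; ring

-- A's tile equality, for a divisor length d, is exactly pointwise tiling
theorem pv_tileEq_iff (l : List String) (d : Nat) (hd : 0 < d)
    (hdvd : d ∣ l.length) :
    (List.replicate (l.length / d) (l.take d)).flatten = l ↔ pvTiles l d := by
  have hn : d ≤ l.length ∨ l.length = 0 := by
    rcases Nat.eq_zero_or_pos l.length with h | h
    · exact Or.inr h
    · exact Or.inl (Nat.le_of_dvd h hdvd)
  rcases hn with hdle | hzero
  · have htl : (l.take d).length = d := by rw [List.length_take]; omega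
    have hlen : (List.replicate (l.length / d) (l.take d)).flatten.length = l.length := by
      rw [pv_flatten_replicate_length, htl, Nat.div_mul_cancel hdvd]
    constructor
    · intro heq j hj
      have hg := pv_flatten_replicate_getD (l.take d) (by omega) (l.length / d) j
        (by rw [htl, Nat.div_mul_cancel hdvd]; exact hj)
      rw [htl, heq] at hg
      rw [hg]
      have hjd : j % d < d := Nat.mod_lt _ hd
      rw [List.getD_eq_getElem _ _ (by omega), List.getD_eq_getElem _ _ (by omega),
        List.getElem_take]
    · intro ht
      apply List.ext_getElem hlen
      intro i h1 h2
      have hg := pv_flatten_replicate_getD (l.take d) (by omega) (l.length / d) i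
        (by rw [htl, Nat.div_mul_cancel hdvd]; exact h2)
      rw [htl] at hg
      have hid : i % d < d := Nat.mod_lt _ hd
      rw [← List.getD_eq_getElem _ "" h1, ← List.getD_eq_getElem _ "" h2, hg,
        List.getD_eq_getElem _ _ (by omega), List.getD_eq_getElem _ _ (by omega),
        List.getElem_take]
      have := ht i h2
      rw [List.getD_eq_getElem _ "" h2, List.getD_eq_getElem _ "" (by omega)] at this
      exact this.symm
  · have hl : l = [] := List.length_eq_zero_iff.mp hzero
    subst hl
    simp [pvTiles]

-- B's generator test is exactly pvCyc
theorem pvShiftFixes_iff (parts : List String) (i : Int) (h0 : 0 ≤ i) :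
    pvShiftFixes parts (parts.length : Int) i = true ↔ pvCyc parts i.toNat := by
  unfold pvShiftFixes pvCyc
  rw [List.all_eq_true]
  constructor
  · intro h j hj
    have hmem : (j : Int) ∈ PySem.List.pyRange 0 (parts.length : Int) 1 := by
      rw [PySem.List.mem_pyRange_one]
      constructor <;> [positivity; exact_mod_cast hj]
    have := h _ hmem
    have hcast : (j : Int) + i = ((j + i.toNat : Nat) : Int) := by
      push_cast [Int.toNat_of_nonneg h0]; ring
    rw [hcast, PySem.Int.mod_natCast, PySem.List.pyGet?_natCast, PySem.List.pyGet?_natCast,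
      List.getElem?_eq_getElem hj, List.getElem?_eq_getElem (Nat.mod_lt _ (by omega))] at this
    rw [List.getD_eq_getElem _ "" hj, List.getD_eq_getElem _ "" (Nat.mod_lt _ (by omega))]
    simpa using this
  · intro h x hx
    rw [PySem.List.mem_pyRange_one] at hx
    obtain ⟨hx0, hxn⟩ := hx
    have hn : 0 < parts.length := by omega
    set j : Nat := x.toNat with hj
    have hxj : x = (j : Int) := (Int.toNat_of_nonneg hx0).symm
    have hjlt : j < parts.length := by omega
    have hcast : (j : Int) + i = ((j + i.toNat : Nat) : Int) := by
      push_cast [Int.toNat_of_nonneg h0]; ring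
    rw [hxj, hcast, PySem.Int.mod_natCast, PySem.List.pyGet?_natCast, PySem.List.pyGet?_natCast,
      List.getElem?_eq_getElem hjlt, List.getElem?_eq_getElem (Nat.mod_lt _ hn)]
    have := h j hjlt
    rw [List.getD_eq_getElem _ "" hjlt, List.getD_eq_getElem _ "" (Nat.mod_lt _ hn)] at this
    simp [this]

-- find? over an integer range: no hit / first hit
theorem pv_find_pyRange_none (pred : Int → Bool) (a b : Int)
    (h : ∀ p, a ≤ p → p < b → pred p = false) :
    (PySem.List.pyRange a b 1).find? pred = none := by
  rw [List.find?_eq_none]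
  intro x hx
  rw [PySem.List.mem_pyRange_one] at hx
  simp [h x hx.1 hx.2]

theorem pv_find_pyRange_hit (pred : Int → Bool) (a b t : Int)
    (h1 : a ≤ t) (h2 : t < b) (ht : pred t = true)
    (hb : ∀ p, a ≤ p → p < t → pred p = false) :
    (PySem.List.pyRange a b 1).find? pred = some t := by
  rw [PySem.List.pyRange_one_append a t b h1 (le_of_lt h2), List.find?_append,
    pv_find_pyRange_none pred a t hb, PySem.List.pyRange_one_cons h2,
    List.find?_cons_of_pos ht]
  rfl

-- A's loop over an explicit list: no hit / first hit
theorem pvALoop_append (parts : List String) (n : Int) (L1 L2 : List Int) :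
    pvALoop parts n (L1 ++ L2) =
      match pvALoop parts n L1 with
      | some r => some r
      | none => pvALoop parts n L2 := by
  induction L1 with
  | nil => simp [pvALoop]
  | cons p L1 ih =>
    simp only [List.cons_append, pvALoop]
    split_ifs with hmod htile
    · exact ih
    · rfl
    · exact ih

theorem pvALoop_none (parts : List String) (n : Int) (L : List Int)
    (h : ∀ p ∈ L, ¬(PySem.Int.mod n p = 0 ∧
      (List.replicate (PySem.Int.floordiv n p).toNat
        (PySem.List.slice parts (some 0) (some p))).flatten = parts)) :
    pvALoop parts n L = none := by
  induction L with
  | nil => rfl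
  | cons p L ih =>
    have hp := h p (List.mem_cons_self ..)
    simp only [pvALoop]
    split_ifs with hmod htile
    · exact ih fun q hq => h q (List.mem_cons_of_mem _ hq)
    · exact absurd ⟨not_not.mp hmod, htile⟩ hp
    · exact ih fun q hq => h q (List.mem_cons_of_mem _ hq)

theorem pvALoop_hit (parts : List String) (n a b t : Int)
    (h1 : a ≤ t) (h2 : t < b)
    (hmod : PySem.Int.mod n t = 0)
    (htile : (List.replicate (PySem.Int.floordiv n t).toNat
        (PySem.List.slice parts (some 0) (some t))).flatten = parts)
    (hb : ∀ p, a ≤ p → p < t → ¬(PySem.Int.mod n p = 0 ∧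
      (List.replicate (PySem.Int.floordiv n p).toNat
        (PySem.List.slice parts (some 0) (some p))).flatten = parts)) :
    pvALoop parts n (PySem.List.pyRange a b 1) = some (PySem.List.slice parts (some 0) (some t)) := by
  rw [PySem.List.pyRange_one_append a t b h1 (le_of_lt h2), pvALoop_append,
    pvALoop_none parts n _ (by
      intro p hp
      rw [PySem.List.mem_pyRange_one] at hp
      exact hb p hp.1 hp.2),
    PySem.List.pyRange_one_cons h2]
  simp only [pvALoop]
  rw [if_neg (by simp [hmod]), if_pos htile]

-- the A-side predicate at a positive integer p is 'p.toNat divides n and tiles'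
theorem pv_apred_iff (parts : List String) (p : Int) (hp : 1 ≤ p) :
    (PySem.Int.mod (parts.length : Int) p = 0 ∧
      (List.replicate (PySem.Int.floordiv (parts.length : Int) p).toNat
        (PySem.List.slice parts (some 0) (some p))).flatten = parts)
    ↔ (p.toNat ∣ parts.length ∧ pvTiles parts p.toNat) := by
  set d : Nat := p.toNat with hd
  have hpd : p = (d : Int) := (Int.toNat_of_nonneg (by omega)).symm
  have hd0 : 0 < d := by omega
  have hslice : PySem.List.slice parts (some 0) (some p) = parts.take d := by
    rw [hpd, PySem.List.slice_zero_start, PySem.List.slice_to_natCast]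
  have hmod : PySem.Int.mod (parts.length : Int) p = 0 ↔ d ∣ parts.length := by
    rw [hpd, PySem.Int.mod_natCast]
    constructor
    · intro h
      have : parts.length % d = 0 := by exact_mod_cast h
      exact Nat.dvd_of_mod_eq_zero this
    · intro h
      obtain ⟨m, hm⟩ := h
      rw [hm]
      simp [Nat.mul_mod_right]
  have hfd : (PySem.Int.floordiv (parts.length : Int) p).toNat = parts.length / d := by
    rw [hpd, PySem.Int.floordiv_natCast, Int.toNat_natCast]
  constructor
  · rintro ⟨h1, h2⟩
    have hdvd : d ∣ parts.length := hmod.mp h1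
    rw [hfd, hslice] at h2
    exact ⟨hdvd, (pv_tileEq_iff parts d hd0 hdvd).mp h2⟩
  · rintro ⟨h1, h2⟩
    refine ⟨hmod.mpr h1, ?_⟩
    rw [hfd, hslice]
    exact (pv_tileEq_iff parts d hd0 h1).mpr h2

-- ===== VERDICT (by name: the statement is the Claim_ definition above) =====
theorem collapse_repeated_sequence_py_spec : Claim_equal_collapse_repeated_sequence_py := by
  intro parts _
  unfold Spec_collapse_repeated_sequence_py
  by_cases hnil : parts = []
  · subst hnil
    rfl
  · have hn0 : 0 < parts.length := List.length_pos_iff.mpr hnil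
    haveI : DecidablePred (fun i => 0 < i ∧ pvCyc parts i) := fun _ => Classical.dec _
    have hex : ∃ i, 0 < i ∧ pvCyc parts i := ⟨parts.length, hn0, pvCyc_len parts⟩
    set s := Nat.find hex with hsdef
    obtain ⟨hs0, hcs⟩ := Nat.find_spec hex
    have hmin : ∀ t, 0 < t → pvCyc parts t → s ≤ t := fun t h1 h2 => Nat.find_min' hex ⟨h1, h2⟩
    have hsn : s ≤ parts.length := hmin _ hn0 (pvCyc_len parts)
    have hdvd_of_cyc : ∀ i, 0 < i → pvCyc parts i → s ∣ i :=
      fun i h1 h2 => pv_min_dvd parts hn0 s i hs0 hcs hmin h1 h2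
    have hcyc_of_dvd : ∀ i, s ∣ i → pvCyc parts i := by
      intro i hi
      obtain ⟨k, rfl⟩ := hi
      have := pvCyc_mul parts s hcs k
      rwa [Nat.mul_comm] at this
    have hsdvdn : s ∣ parts.length := hdvd_of_cyc _ hn0 (pvCyc_len parts)
    have hs1 : (1 : Int) ≤ (s : Int) := by exact_mod_cast hs0
    by_cases hlt : s < parts.length
    · -- repeated: both return parts.take s
      have hhalf : s ≤ parts.length / 2 := by
        obtain ⟨k, hk⟩ := hsdvdn
        have hk2 : 2 ≤ k := by
          rcases Nat.lt_or_ge k 2 with h | h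
          · interval_cases k <;> omega
          · exact h
        rw [Nat.le_div_iff_mul_le (by norm_num)]
        calc s * 2 ≤ s * k := Nat.mul_le_mul_left s hk2
          _ = parts.length := hk.symm
      have hpair := (pv_apred_iff parts (s : Int) hs1).mpr
        (by rw [Int.toNat_natCast]; exact ⟨hsdvdn, pvCyc_tiles parts s hs0 hcs⟩)
      have hbelowA : ∀ p : Int, 1 ≤ p → p < (s : Int) →
          ¬(PySem.Int.mod (parts.length : Int) p = 0 ∧
            (List.replicate (PySem.Int.floordiv (parts.length : Int) p).toNat
              (PySem.List.slice parts (some 0) (some p))).flatten = parts) := by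
        intro p hp1 hps hcontra
        obtain ⟨hdvd, htl⟩ := (pv_apred_iff parts p hp1).mp hcontra
        have hdpos : 0 < p.toNat := by omega
        have := hmin _ hdpos (pvTiles_cyc parts p.toNat hdvd htl)
        omega
      have hA : collapse_repeated_sequence_py parts = parts.take s := by
        have hhit := pvALoop_hit parts (parts.length : Int) 1
          (PySem.Int.floordiv (parts.length : Int) 2 + 1) (s : Int)
          hs1
          (by rw [PySem.Int.floordiv_eq_ediv_of_pos (by norm_num)]; omega)
          hpair.1 hpair.2 hbelowA
        simp only [collapse_repeated_sequence_py, if_neg hnil]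
        rw [hhit, PySem.List.slice_zero_start, PySem.List.slice_to_natCast]
      have hB : collapse_repeated_sequence_py_alt parts = parts.take s := by
        have hfind := pv_find_pyRange_hit (pvShiftFixes parts (parts.length : Int)) 1
          (parts.length : Int) (s : Int) hs1 (by exact_mod_cast hlt)
          (by
            rw [pvShiftFixes_iff parts (s : Int) (by omega), Int.toNat_natCast]
            exact hcs)
          (by
            intro p hp1 hps
            rw [Bool.eq_false_iff]
            intro htrue
            have hc := (pvShiftFixes_iff parts p (by omega)).mp htrue
            have := hmin _ (by omega) hc
            omega)
        simp only [collapse_repeated_sequence_py_alt]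
        rw [hfind]
        simp only [Option.getD_some]
        rw [if_neg (by omega), if_pos (by exact_mod_cast hlt), PySem.List.slice_to_natCast]
      rw [hA, hB]
    · -- no repetition: s = length, both return parts unchanged
      have hseq : s = parts.length := le_antisymm hsn (not_lt.mp hlt)
      have hA : collapse_repeated_sequence_py parts = parts := by
        have hnone := pvALoop_none parts (parts.length : Int)
          (PySem.List.pyRange 1 (PySem.Int.floordiv (parts.length : Int) 2 + 1) 1)
          (by
            intro p hp hcontra
            rw [PySem.List.mem_pyRange_one] at hp
            obtain ⟨hp1, hp2⟩ := hp
            rw [PySem.Int.floordiv_eq_ediv_of_pos (by norm_num)] at hp2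
            obtain ⟨hdvd, htl⟩ := (pv_apred_iff parts p hp1).mp hcontra
            have hdpos : 0 < p.toNat := by omega
            have := hmin _ hdpos (pvTiles_cyc parts p.toNat hdvd htl)
            have hhalf : p.toNat ≤ parts.length / 2 := by omega
            have : parts.length / 2 < parts.length := Nat.div_lt_self hn0 (by norm_num)
            omega)
        simp only [collapse_repeated_sequence_py, if_neg hnil]
        rw [hnone]
      have hB : collapse_repeated_sequence_py_alt parts = parts := by
        have hnone := pv_find_pyRange_none (pvShiftFixes parts (parts.length : Int)) 1
          (parts.length : Int)
          (by
            intro p hp1 hp2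
            rw [Bool.eq_false_iff]
            intro htrue
            have hc := (pvShiftFixes_iff parts p (by omega)).mp htrue
            have := hmin _ (by omega) hc
            omega)
        simp only [collapse_repeated_sequence_py_alt]
        rw [hnone]
        simp only [Option.getD_none]
        rw [if_neg (lt_irrefl _)]
        exact ite_self parts
      rw [hA, hB]
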